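-- pv_equiv track=rewrite | github.com/HeavyGhost-le/RedHawk | core/smart_scanner.py | _prioritize_targets
-- ===== SOURCE A (Python) =====
-- from typing import Dict, List
--
-- def _prioritize_targets(targets: List[str]) -> List[str]:
--     """Prioritize targets by criticality"""
--     # Simple keyword-based prioritization
--     critical_keywords = ['admin', 'api', 'mail', 'vpn', 'auth']
--
--     def priority_score(target: str) -> int:
--         score = 0
--         target_lower = target.lower()
--         for keyword in critical_keywords:
--             if keyword in target_lower:
--                 score += 10
--         return score
--
--     return sorted(targets, key=priority_score, reverse=True)
-- ===== SOURCE B (Python) =====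
-- from typing import List
--
-- def _prioritize_targets(targets: List[str]) -> List[str]:
--     """Prioritize targets by criticality (bucket concatenation, no comparison sort)."""
--     critical_keywords = ['admin', 'api', 'mail', 'vpn', 'auth']
--
--     def hits(target: str) -> int:
--         tl = target.lower()
--         return sum(1 for k in critical_keywords if k in tl)
--
--     result = []
--     for h in range(5, -1, -1):
--         result.extend(t for t in targets if hits(t) == h)
--     return result
-- ===== Notes on version B (the rewrite author's own statement) =====
-- stated objective: alternative
-- what changed: Replaces the comparison sort (sorted with reverse=True) by a bucket pass: the keyword-hit count is in 0..5, so B emits, for each count from 5 down to 0, the targets with that count in input order.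
import Mathlib
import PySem

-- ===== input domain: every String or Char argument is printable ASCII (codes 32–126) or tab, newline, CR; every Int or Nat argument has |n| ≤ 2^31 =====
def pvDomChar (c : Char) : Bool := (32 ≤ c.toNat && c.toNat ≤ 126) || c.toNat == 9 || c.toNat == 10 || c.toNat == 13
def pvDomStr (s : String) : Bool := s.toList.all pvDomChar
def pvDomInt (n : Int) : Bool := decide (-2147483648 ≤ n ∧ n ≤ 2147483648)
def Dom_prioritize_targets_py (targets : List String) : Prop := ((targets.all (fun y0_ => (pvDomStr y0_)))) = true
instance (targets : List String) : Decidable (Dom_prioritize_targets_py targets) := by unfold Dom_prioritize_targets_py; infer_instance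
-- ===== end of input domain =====

-- B replaces A's comparison sort (sorted, key=score, reverse=True) by a bucket pass over the
-- six possible keyword-hit counts, emitting each bucket in input order from 5 hits down to 0.


-- ===== PORT A =====
-- A's inner helper priority_score: +10 for each critical keyword occurring in target.lower()
def pvScoreA (target : String) : Int :=
  ["admin", "api", "mail", "vpn", "auth"].foldl
    (fun score keyword =>
      if PySem.Str.isIn keyword (PySem.Str.lower target) then score + 10 else score) 0

def prioritize_targets_py (targets : List String) : List String :=
  PySem.List.sorted targets pvScoreA true

-- ===== PORT B =====
-- B's inner helper hits: sum(1 for k in critical_keywords if k in target.lower())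
def pvHitsB (target : String) : Int :=
  (["admin", "api", "mail", "vpn", "auth"].map
    (fun k => if PySem.Str.isIn k (PySem.Str.lower target) then (1 : Int) else 0)).sum

def prioritize_targets_py_alt (targets : List String) : List String :=
  (PySem.List.pyRange 5 (-1) (-1)).flatMap
    (fun h => targets.filter (fun t => pvHitsB t == h))

-- ===== PRECONDITION & SPEC =====
def Spec_prioritize_targets_py (targets : List String) (out : List String) : Prop := out = prioritize_targets_py_alt targets
instance (targets : List String) (out : List String) : Decidable (Spec_prioritize_targets_py targets out) := by unfold Spec_prioritize_targets_py; infer_instance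

-- ===== CLAIM (what is proved, stated in full; the proofs are below) =====
def Claim_equal_prioritize_targets_py : Prop := ∀ (targets : List String), Dom_prioritize_targets_py targets → Spec_prioritize_targets_py targets (prioritize_targets_py targets)

-- ===== LEMMAS AND PROOFS =====

-- A's foldl score is 10 times B's 0/1 sum, keyword list generalized.
theorem pvScore_foldl (p : String → Bool) (ks : List String) (a : Int) :
    ks.foldl (fun s k => if p k then s + 10 else s) a
      = a + 10 * (ks.map (fun k => if p k then (1 : Int) else 0)).sum := by
  induction ks generalizing a with
  | nil => simp
  | cons k ks ih =>
    simp only [List.foldl_cons, List.map_cons, List.sum_cons, ih]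
    by_cases h : p k = true
    · rw [if_pos h, if_pos h]; ring
    · rw [if_neg h, if_neg h]; ring

theorem pvScoreA_eq (t : String) : pvScoreA t = 10 * pvHitsB t := by
  unfold pvScoreA pvHitsB
  rw [pvScore_foldl, zero_add]

-- The 0/1 sum lies between 0 and the list length.
theorem pvSum01_bounds (p : String → Bool) (ks : List String) :
    0 ≤ (ks.map (fun k => if p k then (1 : Int) else 0)).sum ∧
      (ks.map (fun k => if p k then (1 : Int) else 0)).sum ≤ ks.length := by
  induction ks with
  | nil => simp
  | cons k ks ih =>
    simp only [List.map_cons, List.sum_cons, List.length_cons]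
    by_cases h : p k = true <;> simp [h] <;> omega

theorem pvHitsB_bounds (t : String) : 0 ≤ pvHitsB t ∧ pvHitsB t ≤ 5 := by
  have := pvSum01_bounds (fun k => PySem.Str.isIn k (PySem.Str.lower t))
    ["admin", "api", "mail", "vpn", "auth"]
  simpa [pvHitsB] using this

-- insertBy walks past a prefix it never inserts before.
theorem pvInsertBy_append {α : Type} (before : α → α → Bool) (x : α) (as bs : List α)
    (h : ∀ a ∈ as, before x a = false) :
    PySem.List.insertBy before x (as ++ bs) = as ++ PySem.List.insertBy before x bs := by
  induction as with
  | nil => simp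
  | cons a as ih =>
    have ha : before x a = false := h a (by simp)
    simp only [List.cons_append, PySem.List.insertBy, ha]
    simp only [Bool.false_eq_true, if_false, List.cons.injEq, true_and]
    exact ih (fun a ha => h a (by simp [ha]))

-- insertBy prepends when it inserts before everything.
theorem pvInsertBy_front {α : Type} (before : α → α → Bool) (x : α) (bs : List α)
    (h : ∀ b ∈ bs, before x b = true) :
    PySem.List.insertBy before x bs = x :: bs := by
  cases bs with
  | nil => simp [PySem.List.insertBy]
  | cons b bs => simp [PySem.List.insertBy, h b (by simp)]

-- flatMap congruence (pointwise equal group functions)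
theorem pvFlatMap_congr {α β : Type} (l : List α) (f g : α → List β)
    (h : ∀ x ∈ l, f x = g x) : l.flatMap f = l.flatMap g := by
  induction l with
  | nil => simp
  | cons a l ih =>
    simp only [List.flatMap_cons, h a (by simp), ih (fun x hx => h x (by simp [hx]))]

-- Key step: inserting x into the grouped list extends exactly its own group (at its end).
theorem pvInsertBy_groups (key : String → Int) (vs : List Int)
    (hvs : vs.Pairwise (fun a b => b < a)) (x : String) (ys : List String)
    (hx : key x ∈ vs) :
    PySem.List.insertBy (fun a b => decide (key b < key a)) x
      (vs.flatMap (fun v => ys.filter (fun t => key t == v)))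
      = vs.flatMap (fun v => (ys ++ [x]).filter (fun t => key t == v)) := by
  induction vs with
  | nil => cases hx
  | cons v vs ih =>
    have hlt : ∀ w ∈ vs, w < v := fun w hw => (List.pairwise_cons.mp hvs).1 w hw
    simp only [List.flatMap_cons]
    by_cases hxv : key x = v
    · -- x belongs to the head group: skip that group, then insert in front of the rest
      rw [pvInsertBy_append _ _ _ _ (by
        intro a ha
        have : key a = v := by simpa using (List.mem_filter.mp ha).2
        simp [this, hxv])]
      rw [pvInsertBy_front _ _ _ (by
        intro b hb
        rcases List.mem_flatMap.mp hb with ⟨w, hw, hbf⟩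
        have : key b = w := by simpa using (List.mem_filter.mp hbf).2
        have := hlt w hw
        simp; omega)]
      have hgroup : (ys ++ [x]).filter (fun t => key t == v)
          = ys.filter (fun t => key t == v) ++ [x] := by
        simp [List.filter_append, hxv]
      rw [hgroup]
      have hrest : ∀ w ∈ vs, (ys ++ [x]).filter (fun t => key t == w)
          = ys.filter (fun t => key t == w) := by
        intro w hw
        have := hlt w hw
        simp [List.filter_append]
        omega
      rw [pvFlatMap_congr vs _ _ hrest]
      simp
    · -- x belongs to a later group: walk past the head group and recurse
      have hx' : key x ∈ vs := by
        rcases List.mem_cons.mp hx with h | h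
        · exact absurd h hxv
        · exact h
      rw [pvInsertBy_append _ _ _ _ (by
        intro a ha
        have hav : key a = v := by simpa using (List.mem_filter.mp ha).2
        have := hlt _ hx'
        simp [hav]; omega)]
      have hhead : (ys ++ [x]).filter (fun t => key t == v)
          = ys.filter (fun t => key t == v) := by
        simp [List.filter_append, hxv]
      rw [hhead, ih (List.pairwise_cons.mp hvs).2 hx']

-- Stable reverse sort with keys drawn from a strictly decreasing value list
-- equals the concatenation of the filter-groups in that order.
theorem pvSorted_eq_groups (key : String → Int) (vs : List Int)
    (hvs : vs.Pairwise (fun a b => b < a)) (xs : List String)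
    (hx : ∀ x ∈ xs, key x ∈ vs) :
    PySem.List.sorted xs key true = vs.flatMap (fun v => xs.filter (fun t => key t == v)) := by
  rw [PySem.List.sorted_rev_eq_foldl_insertBy]
  induction xs using List.reverseRecOn with
  | nil => simp
  | append_singleton ys x ih =>
    rw [List.foldl_append, List.foldl_cons, List.foldl_nil]
    rw [ih (fun y hy => hx y (by simp [hy]))]
    exact pvInsertBy_groups key vs hvs x ys (hx x (by simp))

theorem pvBeq_ten (c h : Int) : ((10 * c : Int) == 10 * h) = (c == h) := by
  by_cases hc : c = h
  · simp [hc]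
  · have : (10 * c : Int) ≠ 10 * h := by omega
    simp [hc, this]

-- ===== VERDICT (by name: the statement is the Claim_ definition above) =====
theorem prioritize_targets_py_spec : Claim_equal_prioritize_targets_py := by
  intro targets _
  show prioritize_targets_py targets = prioritize_targets_py_alt targets
  have hmem : ∀ x ∈ targets, pvScoreA x ∈ ([50, 40, 30, 20, 10, 0] : List Int) := by
    intro x _
    have hb := pvHitsB_bounds x
    rw [pvScoreA_eq]
    simp only [List.mem_cons, List.not_mem_nil, or_false]
    omega
  have h := pvSorted_eq_groups pvScoreA [50, 40, 30, 20, 10, 0] (by decide) targets hmem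
  rw [prioritize_targets_py, h]
  have hr : PySem.List.pyRange 5 (-1) (-1) = [5, 4, 3, 2, 1, 0] := by decide
  rw [prioritize_targets_py_alt.eq_def, hr]
  simp only [List.flatMap_cons, List.flatMap_nil, List.append_nil]
  have hf : ∀ (h : Int), targets.filter (fun t => pvScoreA t == 10 * h)
      = targets.filter (fun t => pvHitsB t == h) := by
    intro h
    apply List.filter_congr
    intro t _
    rw [pvScoreA_eq, pvBeq_ten]
  have e50 := hf 5; have e40 := hf 4; have e30 := hf 3
  have e20 := hf 2; have e10 := hf 1; have e0 := hf 0
  norm_num at e50 e40 e30 e20 e10 e0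
  rw [e50, e40, e30, e20, e10, e0]
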